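-- pv_equiv track=rewrite | github.com/cwhit-io/fireman | apps/mailmerge/services.py | _barcode_slot
-- ===== SOURCE A (Python) =====
-- _BARCODE_FIELD: str = "encodedimbno"
--
-- def _barcode_slot(
--     record: dict[str, str],
--     fields: list[str],
-- ) -> tuple[str, int] | None:
--     """Return ``(barcode_text, slot_index)`` for the barcode field, or ``None``.
--
--     ``slot_index`` is the 0-based sequential position among **non-empty** fields
--     (same basis used to compute Y offsets in the address block).
--     """
--     if _BARCODE_FIELD not in fields:
--         return None
--     barcode_text = record.get(_BARCODE_FIELD, "").strip()
--     if not barcode_text: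
--         return None
--     slot = 0
--     for f in fields:
--         if not record.get(f, "").strip():
--             continue
--         if f == _BARCODE_FIELD:
--             return (barcode_text, slot)
--         slot += 1
--     return None
-- ===== SOURCE B (Python) =====
-- _BARCODE_FIELD: str = "encodedimbno"
--
-- def _barcode_slot(record, fields):
--     non_empty = [f for f in fields if record.get(f, "").strip()]
--     if _BARCODE_FIELD not in non_empty:
--         return None
--     return (record.get(_BARCODE_FIELD, "").strip(), non_empty.index(_BARCODE_FIELD))
-- ===== Notes on version B (the rewrite author's own statement) =====
-- stated objective: simpler
-- what changed: Replaces A's three guards plus manual slot-counter loop with one comprehension building the non-empty field list; membership in it subsumes both guards and .index gives the slot.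
import Mathlib
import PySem

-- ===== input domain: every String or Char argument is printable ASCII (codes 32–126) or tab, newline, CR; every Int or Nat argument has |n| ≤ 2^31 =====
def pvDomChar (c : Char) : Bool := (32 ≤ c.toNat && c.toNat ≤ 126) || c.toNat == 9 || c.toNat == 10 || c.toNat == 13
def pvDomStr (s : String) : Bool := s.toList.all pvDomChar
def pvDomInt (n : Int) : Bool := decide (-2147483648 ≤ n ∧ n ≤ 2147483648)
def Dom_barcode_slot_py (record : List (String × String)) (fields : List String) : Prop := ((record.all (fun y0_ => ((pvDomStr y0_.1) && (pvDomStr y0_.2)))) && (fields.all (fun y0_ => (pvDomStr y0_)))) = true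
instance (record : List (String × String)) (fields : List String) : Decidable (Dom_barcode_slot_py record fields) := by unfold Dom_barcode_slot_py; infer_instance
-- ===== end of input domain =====

-- B replaces A's guard chain and manual slot counter with a filtered list of non-empty
-- fields plus membership/.index; objective: simpler. Equivalence is proved on all inputs.

-- record.get(f, "").strip()  (dict lookup = first match in the association list)
def pvField (record : List (String × String)) (f : String) : String :=
  PySem.Str.strip ((List.lookup f record).getD "")

-- ===== PORT A =====
-- the 'for f in fields' loop with its running slot counter
def pvBarcodeLoop (record : List (String × String)) (bt : String) :
    List String → Int → Option (String × Int)
  | [], _ => none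
  | f :: rest, slot =>
    if pvField record f = "" then pvBarcodeLoop record bt rest slot
    else if f = "encodedimbno" then some (bt, slot)
    else pvBarcodeLoop record bt rest (slot + 1)

def barcode_slot_py (record : List (String × String)) (fields : List String) : Option (String × Int) :=
  if "encodedimbno" ∈ fields then
    let bt := pvField record "encodedimbno"
    if bt = "" then none
    else pvBarcodeLoop record bt fields 0
  else none

-- ===== PORT B =====
def barcode_slot_py_alt (record : List (String × String)) (fields : List String) : Option (String × Int) :=
  let nonEmpty := fields.filter (fun f => decide (pvField record f ≠ ""))
  if "encodedimbno" ∈ nonEmpty then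
    match PySem.List.index? nonEmpty "encodedimbno" with
    | some i => some (pvField record "encodedimbno", (i : Int))
    | none => none
  else none

-- ===== PRECONDITION & SPEC =====
def Spec_barcode_slot_py (record : List (String × String)) (fields : List String) (out : Option (String × Int)) : Prop := out = barcode_slot_py_alt record fields
instance (record : List (String × String)) (fields : List String) (out : Option (String × Int)) : Decidable (Spec_barcode_slot_py record fields out) := by unfold Spec_barcode_slot_py; infer_instance

-- ===== CLAIM (what is proved, stated in full; the proofs are below) =====
def Claim_equal_barcode_slot_py : Prop := ∀ (record : List (String × String)) (fields : List String), Dom_barcode_slot_py record fields → Spec_barcode_slot_py record fields (barcode_slot_py record fields)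

-- ===== LEMMAS AND PROOFS =====

-- A's loop computes the index of the barcode field within the filtered list, offset by the
-- running counter.
theorem pvBarcodeLoop_eq (record : List (String × String)) (bt : String)
    (fields : List String) (s : Int) :
    pvBarcodeLoop record bt fields s =
      (PySem.List.index? (fields.filter (fun f => decide (pvField record f ≠ ""))) "encodedimbno").map
        (fun i => (bt, s + (i : Int))) := by
  induction fields generalizing s with
  | nil => simp [pvBarcodeLoop, PySem.List.index?]
  | cons f rest ih =>
    by_cases he : pvField record f = ""
    · simp [pvBarcodeLoop, he, ih]
    · by_cases hb : f = "encodedimbno"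
      · subst hb
        rw [show ("encodedimbno" :: rest).filter (fun f => decide (pvField record f ≠ "")) =
              "encodedimbno" :: rest.filter (fun f => decide (pvField record f ≠ "")) by simp [he],
            PySem.List.index?_cons_self]
        simp [pvBarcodeLoop, he]
      · rw [show (f :: rest).filter (fun f => decide (pvField record f ≠ "")) =
              f :: rest.filter (fun f => decide (pvField record f ≠ "")) by simp [he],
            PySem.List.index?_cons_of_ne _ hb]
        simp only [pvBarcodeLoop, he, hb, if_neg, if_false, ite_false]
        rw [ih]
        cases PySem.List.index? (rest.filter (fun f => decide (pvField record f ≠ ""))) "encodedimbno" with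
        | none => simp
        | some i => simp; push_cast; ring

-- ===== VERDICT (by name: the statement is the Claim_ definition above) =====
theorem barcode_slot_py_spec : Claim_equal_barcode_slot_py := by
  intro record fields _
  unfold Spec_barcode_slot_py barcode_slot_py barcode_slot_py_alt
  by_cases hmem : "encodedimbno" ∈ fields
  · simp only [hmem, if_true]
    by_cases hbt : pvField record "encodedimbno" = ""
    · simp [hbt]
    · have hne : "encodedimbno" ∈ fields.filter (fun f => decide (pvField record f ≠ "")) := by
        simp [List.mem_filter, hmem, hbt]
      rw [if_neg hbt, pvBarcodeLoop_eq, if_pos hne]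
      obtain ⟨i, hi⟩ := Option.isSome_iff_exists.mp
        ((PySem.List.index?_isSome_iff _ _).mpr hne)
      rw [hi]
      simp
  · simp [hmem]
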